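-- pv_equiv track=rewrite | github.com/nelsonng2258/Tweets-Affecting-Bitcoin-Prices | my_Functions_btc_wrangle.py | final_lt
-- ===== SOURCE A (Python) =====
-- def final_lt(modified_others_lt):
--
--     '''Create a list of bitcoin price change (%), bitcoin price (usd), and consolidated combined text based on date.'''
--
--     holding_lt = []
--     final_lt = []
--     counter = 0
--
--     # Create list within list within final_lt by reorganizing modified_others_lt.
--     for i, j in enumerate(modified_others_lt):
--
--         # Segregate bitcoin price change (%), bitcoin price (usd), consolidated combined text based on date.
--         if counter <=2:
--
--             # Append into holding_lt.
--             holding_lt.append(j)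
--
--             counter += 1
--
--         # Reset done to prepare for the next index.
--         if counter == 3:
--
--             # Append holding_lt to final_lt.
--             final_lt.append(holding_lt)
--
--             # Reset the holding_lt.
--             holding_lt = []
--
--             # Reset the counter.
--             counter = 0
--
--     return final_lt
-- ===== SOURCE B (Python) =====
-- def final_lt(modified_others_lt):
--     '''Create a list of bitcoin price change (%), bitcoin price (usd), and consolidated combined text based on date.'''
--     it = iter(modified_others_lt)
--     return [list(group) for group in zip(it, it, it)]
-- ===== Notes on version B (the rewrite author's own statement) =====
-- stated objective: idiomatic
-- what changed: Replaced the counter/holding-list accumulator loop with the shared-iterator grouper idiom (zip(it, it, it)), which consumes three elements per step and drops the incomplete tail naturally.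
import Mathlib
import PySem

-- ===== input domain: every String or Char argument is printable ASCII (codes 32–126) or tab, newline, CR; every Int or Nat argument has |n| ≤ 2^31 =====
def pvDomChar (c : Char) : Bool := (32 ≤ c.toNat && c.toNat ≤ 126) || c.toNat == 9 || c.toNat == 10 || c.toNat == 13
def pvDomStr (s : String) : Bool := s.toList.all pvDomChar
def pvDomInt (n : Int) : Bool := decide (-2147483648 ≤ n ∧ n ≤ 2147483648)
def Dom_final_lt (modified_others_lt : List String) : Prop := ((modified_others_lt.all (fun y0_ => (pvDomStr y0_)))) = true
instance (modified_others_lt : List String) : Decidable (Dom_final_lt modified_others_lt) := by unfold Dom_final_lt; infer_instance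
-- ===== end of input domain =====

-- B groups by repeatedly taking three elements from the front (the shared-iterator zip idiom),
-- instead of A's counter + holding-list accumulator; same values, idiomatic decomposition.

-- ===== PORT A =====
-- one loop step: state = (holding_lt, final_lt, counter), exactly as in A's body
def finalLtStep (st : List String × List (List String) × Int) (j : String) :
    List String × List (List String) × Int :=
  let (holding, fin, counter) := st
  let (holding, counter) :=
    if counter ≤ 2 then (holding ++ [j], counter + 1) else (holding, counter)
  if counter == 3 then ([], fin ++ [holding], 0) else (holding, fin, counter)

def final_lt (modified_others_lt : List String) : List (List String) :=
  (modified_others_lt.foldl finalLtStep ([], [], 0)).2.1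

-- ===== PORT B =====
-- zip(it, it, it): take three elements per step, stop when fewer than three remain
def final_lt_alt (modified_others_lt : List String) : List (List String) :=
  match modified_others_lt with
  | a :: b :: c :: rest => [a, b, c] :: final_lt_alt rest
  | _ => []

-- ===== PRECONDITION & SPEC =====
def Spec_final_lt (modified_others_lt : List String) (out : List (List String)) : Prop := out = final_lt_alt modified_others_lt
instance (modified_others_lt : List String) (out : List (List String)) : Decidable (Spec_final_lt modified_others_lt out) := by unfold Spec_final_lt; infer_instance

-- ===== CLAIM (what is proved, stated in full; the proofs are below) =====
def Claim_equal_final_lt : Prop := ∀ (modified_others_lt : List String), Dom_final_lt modified_others_lt → Spec_final_lt modified_others_lt (final_lt modified_others_lt)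

-- ===== LEMMAS AND PROOFS =====

-- loop invariant: starting a group (empty holding, counter 0), the fold appends B's chunks
lemma final_lt_loop (l : List String) (f : List (List String)) :
    (l.foldl finalLtStep ([], f, 0)).2.1 = f ++ final_lt_alt l := by
  induction l using final_lt_alt.induct generalizing f with
  | case1 a b c rest ih =>
      simp [List.foldl, finalLtStep, final_lt_alt, ih, List.append_assoc]
  | case2 l h =>
      rcases l with _ | ⟨a, _ | ⟨b, _ | ⟨c, rest⟩⟩⟩
      · simp [final_lt_alt]
      · simp [List.foldl, finalLtStep, final_lt_alt]
      · simp [List.foldl, finalLtStep, final_lt_alt]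
      · exact absurd rfl (h a b c rest)

-- ===== VERDICT (by name: the statement is the Claim_ definition above) =====
theorem final_lt_spec : Claim_equal_final_lt := by
  intro l _
  show final_lt l = final_lt_alt l
  simpa [final_lt] using final_lt_loop l []
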